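-- pv_equiv track=rewrite | github.com/LinkoutAimsHigh/TIPE | Fonctions essentielles (DO NOT RUN).py | minuscules
-- ===== SOURCE A (Python) =====
-- def minuscules(String):
--     m1,m2 =ord('A'),ord('a')
--     dm = m2-m1
--     FS = ''
--     for s in String:
--         if ord(s)<m2:
--             FS = FS+chr(ord(s)+dm)
--         else:
--             FS = FS +s
--     return FS
-- ===== SOURCE B (Python) =====
-- def minuscules(String):
--     # Divide and conquer: halve the string recursively; a single character is
--     # shifted branchlessly by 32*(code < 97).
--     if len(String) <= 1:
--         if not String:
--             return String
--         c = ord(String)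
--         return chr(c + 32 * (c < 97))
--     m = len(String) // 2
--     return minuscules(String[:m]) + minuscules(String[m:])
-- ===== Notes on version B (the rewrite author's own statement) =====
-- stated objective: alternative
-- what changed: Replaces A's left-to-right accumulate-and-concatenate loop with a divide-and-conquer recursion that splits the string in halves and transforms a lone character branchlessly via chr(c + 32*(c < 97)).
import Mathlib
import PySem

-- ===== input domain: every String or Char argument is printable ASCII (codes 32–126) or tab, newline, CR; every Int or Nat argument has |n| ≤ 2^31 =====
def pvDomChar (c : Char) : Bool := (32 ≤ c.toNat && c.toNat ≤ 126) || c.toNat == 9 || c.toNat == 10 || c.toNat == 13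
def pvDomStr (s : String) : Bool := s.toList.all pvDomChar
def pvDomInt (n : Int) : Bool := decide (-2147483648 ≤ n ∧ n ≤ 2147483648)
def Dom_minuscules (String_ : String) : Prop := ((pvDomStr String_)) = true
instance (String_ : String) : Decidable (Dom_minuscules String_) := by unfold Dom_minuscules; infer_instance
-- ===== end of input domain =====

-- B replaces A's accumulate-and-concatenate loop with a divide-and-conquer recursion
-- on string halves, transforming a lone character branchlessly (alternative; same value).

-- ===== PORT A =====
-- A: accumulate FS, appending chr(ord(s)+32) when ord(s) < ord('a') = 97, else s itself.
def minuscules (String_ : String) : String :=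
  String.ofList (String_.toList.foldl (fun FS s =>
    if ((s.toNat : Int)) < 97 then FS ++ [Char.ofNat ((s.toNat : Int) + 32).toNat]
    else FS ++ [s]) [])

-- ===== PORT B =====
-- B: if len <= 1 handle the base cases (empty, or one char shifted by 32*(c<97));
-- otherwise recurse on the two halves split at len//2 and concatenate.
def minusculesGo (s : List Char) : List Char :=
  if s.length ≤ 1 then
    match s with
    | [] => []
    | c :: _ => [Char.ofNat (c.toNat + 32 * (if (c.toNat : Int) < 97 then 1 else 0))]
  else
    minusculesGo (s.take (s.length / 2)) ++ minusculesGo (s.drop (s.length / 2))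
termination_by s.length
decreasing_by
  · simp only [List.length_take]; omega
  · simp only [List.length_drop]; omega

def minuscules_alt (String_ : String) : String :=
  String.ofList (minusculesGo String_.toList)

-- ===== PRECONDITION & SPEC =====
def Spec_minuscules (String_ : String) (out : String) : Prop := out = minuscules_alt String_
instance (String_ : String) (out : String) : Decidable (Spec_minuscules String_ out) := by unfold Spec_minuscules; infer_instance

-- ===== CLAIM (what is proved, stated in full; the proofs are below) =====
def Claim_equal_minuscules : Prop := ∀ (String_ : String), Dom_minuscules String_ → Spec_minuscules String_ (minuscules String_)

-- ===== LEMMAS AND PROOFS =====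

-- B's divide-and-conquer computes the per-character map (strong induction on a length bound)
lemma minusculesGo_eq_map_aux (n : Nat) : ∀ s : List Char, s.length ≤ n →
    minusculesGo s = s.map (fun c =>
      Char.ofNat (c.toNat + 32 * (if (c.toNat : Int) < 97 then 1 else 0))) := by
  induction n with
  | zero =>
    intro s hs
    have hnil : s = [] := List.length_eq_zero_iff.mp (Nat.le_zero.mp hs)
    subst hnil
    rw [minusculesGo]; simp
  | succ m ih =>
    intro s hs
    by_cases h : s.length ≤ 1
    · cases s with
      | nil => rw [minusculesGo]; simp
      | cons c t =>
        have ht : t = [] := by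
          simp only [List.length_cons] at h
          exact List.length_eq_zero_iff.mp (by omega)
        subst ht
        rw [minusculesGo]; simp
    · rw [minusculesGo.eq_def, if_neg h]
      rw [ih _ (by simp only [List.length_take]; omega),
          ih _ (by simp only [List.length_drop]; omega),
          ← List.map_append, List.take_append_drop]

lemma minusculesGo_eq_map (s : List Char) :
    minusculesGo s = s.map (fun c =>
      Char.ofNat (c.toNat + 32 * (if (c.toNat : Int) < 97 then 1 else 0))) :=
  minusculesGo_eq_map_aux s.length s le_rfl

-- ===== VERDICT (by name: the statement is the Claim_ definition above) =====
theorem minuscules_spec : Claim_equal_minuscules := by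
  intro String_ _
  show _ = _
  unfold minuscules minuscules_alt
  rw [minusculesGo_eq_map]
  have hfun : (fun (FS : List Char) (s : Char) =>
      if ((s.toNat : Int)) < 97 then FS ++ [Char.ofNat ((s.toNat : Int) + 32).toNat]
      else FS ++ [s])
      = fun FS s => FS ++ [if ((s.toNat : Int)) < 97
          then Char.ofNat ((s.toNat : Int) + 32).toNat else s] := by
    funext FS s; split_ifs <;> rfl
  rw [hfun, PySem.List.foldl_append_singleton_eq_map]
  simp only [List.nil_append]
  congr 1
  apply List.map_congr_left
  intro c _
  by_cases h : ((c.toNat : Int)) < 97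
  · rw [if_pos h, if_pos h]
    have hnat : ((c.toNat : Int) + 32).toNat = c.toNat + 32 * 1 := by omega
    rw [hnat]
  · rw [if_neg h, if_neg h, Nat.mul_zero, Nat.add_zero, Char.ofNat_toNat]
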